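-- pv_equiv track=rewrite | github.com/agrigaliunas/InfoGeneral | otrasFunciones/secuenciaVocales.py | palabra
-- ===== SOURCE A (Python) =====
-- def esVocal(l):
--     if l == "a" or l == "A" or l == "e" or l == "E"  or l == "i"  or l == "I"  or l == "o"  or l == "O"  or l == "u" or  l == "U":
--         return True
--     else:
--         return False
--
-- def EsLetra(l):
--     if (l >= "a" and l <= "z") or (l >= "A" and l <= "Z"):
--         return True
--     else:
--         return False
--
-- def comparar(palabra):
--     i = 0
--     while i < len(palabra)-1:
--
--         if esVocal(palabra[i]) and esVocal(palabra[i+1]) and palabra[i] != palabra[i+1]: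
--             return True
--         i+=1
--     return False
--
-- def palabra(frase):
--     i = 0
--     cont = 0
--     while i < len(frase):
--         while i < len(frase) and not EsLetra(frase[i]):
--             i += 1
--         palabra = ""
--         while i < len(frase) and EsLetra(frase[i]):
--             palabra += frase[i]
--             i+= 1
--         if comparar(palabra):
--             cont+= 1
--     return cont
-- ===== SOURCE B (Python) =====
-- def palabra(frase):
--     cont = 0
--     in_word = False
--     prev_vowel = None
--     qualifies = False
--     for c in frase:
--         if ('a' <= c <= 'z') or ('A' <= c <= 'Z'):
--             es_v = c in 'aeiouAEIOU'
--             if in_word and prev_vowel is not None and es_v and c != prev_vowel: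
--                 qualifies = True
--             prev_vowel = c if es_v else None
--             in_word = True
--         else:
--             if in_word and qualifies:
--                 cont += 1
--             in_word = False
--             prev_vowel = None
--             qualifies = False
--     if in_word and qualifies:
--         cont += 1
--     return cont
-- ===== Notes on version B (the rewrite author's own statement) =====
-- stated objective: alternative
-- what changed: replaces A's nested while-loops, which build each word as a string and re-scan it with comparar, by a single forward pass over the characters keeping only (count, in_word, last-vowel, qualifies) state
import Mathlib
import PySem

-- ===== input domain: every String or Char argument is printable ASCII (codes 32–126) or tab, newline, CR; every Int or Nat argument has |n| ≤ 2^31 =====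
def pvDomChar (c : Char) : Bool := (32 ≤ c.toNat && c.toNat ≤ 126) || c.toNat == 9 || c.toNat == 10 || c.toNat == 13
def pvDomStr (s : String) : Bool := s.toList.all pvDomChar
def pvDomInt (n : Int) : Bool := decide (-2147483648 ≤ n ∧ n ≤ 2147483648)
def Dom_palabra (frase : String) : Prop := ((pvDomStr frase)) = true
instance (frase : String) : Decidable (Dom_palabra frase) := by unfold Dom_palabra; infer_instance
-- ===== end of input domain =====

-- B replaces A's nested while-loops (which build each word as a string and re-scan it with
-- comparar) by a single forward pass with a small state machine; objective: alternative.

-- ===== PORT A =====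
def esVocal (l : Char) : Bool :=
  if l == 'a' || l == 'A' || l == 'e' || l == 'E' || l == 'i' || l == 'I' || l == 'o' || l == 'O' || l == 'u' || l == 'U' then true else false

def esLetra (l : Char) : Bool :=
  if (decide ('a' ≤ l) && decide (l ≤ 'z')) || (decide ('A' ≤ l) && decide (l ≤ 'Z')) then true else false

-- comparar's index loop `while i < len(palabra)-1`, as the obvious recursion over the chars
def compararGo : List Char → Bool
  | a :: b :: t => if esVocal a && esVocal b && decide (a ≠ b) then true else compararGo (b :: t)
  | _ => false

def comparar (palabra : String) : Bool := compararGo palabra.toList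

-- the inner `while i < len and EsLetra` loop: builds the word with push (palabra += frase[i])
def collectA : List Char → String → String × List Char
  | [], acc => (acc, [])
  | c :: rest, acc => if esLetra c then collectA rest (acc.push c) else (acc, c :: rest)

-- termination helper for loopA (cited by its decreasing_by)
theorem collectA_snd_len : ∀ (cs : List Char) (acc : String), (collectA cs acc).2.length ≤ cs.length := by
  intro cs
  induction cs with
  | nil => intro acc; simp [collectA]
  | cons c rest ih =>
    intro acc
    by_cases h : esLetra c = true
    · simpa [collectA, h] using Nat.le_succ_of_le (ih (acc.push c))
    · simp [collectA, h]

-- the outer while loop of `palabra` (skipping one non-letter per outer step)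
def loopA (cs : List Char) (cont : Int) : Int :=
  match cs with
  | [] => cont
  | c :: rest =>
    if esLetra c then
      let p := collectA (c :: rest) ""
      loopA p.2 (if comparar p.1 then cont + 1 else cont)
    else
      loopA rest cont
termination_by cs.length
decreasing_by
  · have h := collectA_snd_len rest ("".push c)
    simp only [collectA, *]
    simp at h ⊢
    omega
  · simp

def palabra (frase : String) : Int := loopA frase.toList 0

-- ===== PORT B =====
def vocalB (c : Char) : Bool := ("aeiouAEIOU".toList).contains c

def letraB (c : Char) : Bool := (decide ('a' ≤ c) && decide (c ≤ 'z')) || (decide ('A' ≤ c) && decide (c ≤ 'Z'))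

-- one iteration of Source B's for-loop over the state (cont, in_word, prev_vowel, qualifies)
def stepB (st : Int × Bool × Option Char × Bool) (c : Char) : Int × Bool × Option Char × Bool :=
  match st with
  | (cont, inw, prev, qual) =>
    if letraB c then
      let esV := vocalB c
      let qual' := qual || (inw && (match prev with
        | some p => esV && decide (c ≠ p)
        | none => false))
      (cont, true, (if esV then some c else none), qual')
    else
      ((if inw && qual then cont + 1 else cont), false, none, false)

def palabra_alt (frase : String) : Int :=
  let st := frase.toList.foldl stepB (0, false, none, false)
  if st.2.1 && st.2.2.2 then st.1 + 1 else st.1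

-- ===== PRECONDITION & SPEC =====
def Spec_palabra (frase : String) (out : Int) : Prop := out = palabra_alt frase
instance (frase : String) (out : Int) : Decidable (Spec_palabra frase out) := by unfold Spec_palabra; infer_instance

-- ===== CLAIM (what is proved, stated in full; the proofs are below) =====
def Claim_equal_palabra : Prop := ∀ (frase : String), Dom_palabra frase → Spec_palabra frase (palabra frase)

-- ===== LEMMAS AND PROOFS =====

theorem vocalB_eq (c : Char) : vocalB c = esVocal c := by
  by_cases h1 : c = 'a'; · subst h1; rfl
  by_cases h2 : c = 'e'; · subst h2; rfl
  by_cases h3 : c = 'i'; · subst h3; rfl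
  by_cases h4 : c = 'o'; · subst h4; rfl
  by_cases h5 : c = 'u'; · subst h5; rfl
  by_cases h6 : c = 'A'; · subst h6; rfl
  by_cases h7 : c = 'E'; · subst h7; rfl
  by_cases h8 : c = 'I'; · subst h8; rfl
  by_cases h9 : c = 'O'; · subst h9; rfl
  by_cases h10 : c = 'U'; · subst h10; rfl
  have hl : ("aeiouAEIOU".toList) = ['a','e','i','o','u','A','E','I','O','U'] := rfl
  simp [vocalB, esVocal, hl, h1, h2, h3, h4, h5, h6, h7, h8, h9, h10]

theorem letraB_eq (c : Char) : letraB c = esLetra c := by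
  simp [letraB, esLetra]

-- the vowel identity of the last character of a (partial) word
def lastVowel (w : List Char) : Option Char :=
  match w.getLast? with
  | some p => if esVocal p then some p else none
  | none => none

def finalizeB (st : Int × Bool × Option Char × Bool) : Int :=
  if st.2.1 && st.2.2.2 then st.1 + 1 else st.1

theorem palabra_alt_eq (frase : String) :
    palabra_alt frase = finalizeB (frase.toList.foldl stepB (0, false, none, false)) := rfl

theorem compararGo_snoc (w : List Char) (c : Char) :
    compararGo (w ++ [c]) =
      (compararGo w || (match lastVowel w with
        | some p => esVocal c && decide (c ≠ p)
        | none => false)) := by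
  induction w with
  | nil => simp [compararGo, lastVowel]
  | cons a t ih =>
    cases t with
    | nil =>
      by_cases hv : esVocal a = true
      · by_cases he : a = c
        · subst he; simp [compararGo, lastVowel, hv]
        · have he' : ¬ c = a := fun h => he h.symm
          simp [compararGo, lastVowel, hv, he, he']
      · simp [compararGo, lastVowel, hv]
    | cons b t' =>
      have hl : lastVowel (a :: b :: t') = lastVowel (b :: t') := by
        simp [lastVowel, List.getLast?_cons_cons]
      have h1 : compararGo ((a :: b :: t') ++ [c]) =
          ((esVocal a && esVocal b && decide (a ≠ b)) || compararGo ((b :: t') ++ [c])) := by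
        simp only [List.cons_append, compararGo, Bool.if_true_left, Bool.decide_eq_true]
      have h2 : compararGo (a :: b :: t') =
          ((esVocal a && esVocal b && decide (a ≠ b)) || compararGo (b :: t')) := by
        simp only [compararGo, Bool.if_true_left, Bool.decide_eq_true]
      rw [h1, h2, hl, ih, Bool.or_assoc]

theorem lastVowel_snoc (w : List Char) (c : Char) :
    lastVowel (w ++ [c]) = (if esVocal c then some c else none) := by
  simp [lastVowel]

theorem collectA_eq : ∀ (cs : List Char) (acc : String),
    (collectA cs acc).1.toList = acc.toList ++ cs.takeWhile esLetra ∧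
    (collectA cs acc).2 = cs.dropWhile esLetra := by
  intro cs
  induction cs with
  | nil => intro acc; simp [collectA]
  | cons c rest ih =>
    intro acc
    by_cases h : esLetra c = true
    · have := ih (acc.push c)
      simp [collectA, h, this.1, this.2, String.toList_push]
    · simp [collectA, h]

theorem mainAux : ∀ (n : ℕ) (cs : List Char), cs.length ≤ n →
    (∀ cont : Int, finalizeB (cs.foldl stepB (cont, false, none, false)) = loopA cs cont) ∧
    (∀ (w : List Char) (cont : Int),
      finalizeB (cs.foldl stepB (cont, true, lastVowel w, compararGo w)) =
        loopA (cs.dropWhile esLetra)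
          (if compararGo (w ++ cs.takeWhile esLetra) then cont + 1 else cont)) := by
  intro n
  induction n with
  | zero =>
    intro cs hlen
    have hcs : cs = [] := List.eq_nil_of_length_eq_zero (Nat.le_zero.mp hlen)
    subst hcs
    constructor
    · intro cont; rw [loopA.eq_def]; simp [finalizeB]
    · intro w cont; rw [loopA.eq_def]; simp [finalizeB]
  | succ n ih =>
    intro cs hlen
    cases cs with
    | nil =>
      constructor
      · intro cont; rw [loopA.eq_def]; simp [finalizeB]
      · intro w cont; rw [loopA.eq_def]; simp [finalizeB]
    | cons c r =>
      have hr := ih r (by simp at hlen; omega)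
      constructor
      · intro cont
        by_cases h : esLetra c = true
        · have hstep : stepB (cont, false, none, false) c =
              (cont, true, lastVowel [c], compararGo [c]) := by
            simp [stepB, letraB_eq, h, vocalB_eq, lastVowel, compararGo]
          rw [List.foldl_cons, hstep, hr.2 [c] cont]
          conv_rhs => rw [loopA.eq_def]
          simp only [h, if_true]
          have hc := collectA_eq (c :: r) ""
          have h1 : (collectA (c :: r) "").1.toList = c :: r.takeWhile esLetra := by
            simpa [h] using hc.1
          have h2 : (collectA (c :: r) "").2 = r.dropWhile esLetra := by
            simpa [h] using hc.2
          rw [comparar, h1, h2]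
          rfl
        · have hstep : stepB (cont, false, none, false) c = (cont, false, none, false) := by
            simp [stepB, letraB_eq, h]
          rw [List.foldl_cons, hstep, hr.1 cont]
          conv_rhs => rw [loopA.eq_def]
          simp [h]
      · intro w cont
        by_cases h : esLetra c = true
        · have hstep : stepB (cont, true, lastVowel w, compararGo w) c =
              (cont, true, lastVowel (w ++ [c]), compararGo (w ++ [c])) := by
            rw [compararGo_snoc, lastVowel_snoc]
            simp [stepB, letraB_eq, h, vocalB_eq]
          rw [List.foldl_cons, hstep, hr.2 (w ++ [c]) cont]
          simp [h, List.append_assoc]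
        · have hstep : stepB (cont, true, lastVowel w, compararGo w) c =
              ((if compararGo w then cont + 1 else cont), false, none, false) := by
            simp [stepB, letraB_eq, h]
          rw [List.foldl_cons, hstep, hr.1 _]
          conv_rhs => rw [loopA.eq_def]
          simp [h]

-- ===== VERDICT (by name: the statement is the Claim_ definition above) =====
theorem palabra_spec : Claim_equal_palabra := by
  intro frase _
  unfold Spec_palabra
  rw [palabra_alt_eq, palabra]
  exact ((mainAux frase.toList.length frase.toList le_rfl).1 0).symm
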